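-- pv_equiv track=rewrite | github.com/Komal97/GeekForGeeks-Problems | Array/longest_prefix_with_same_x_&_y.py | findLongestPrefix
-- ===== SOURCE A (Python) =====
-- def findLongestPrefix(arr, n, x, y):
--
--     count_x = 0
--     count_y = 0
--
--     ans = -1
--     for i in range(n):
--         if arr[i] == x:
--             count_x += 1
--         if arr[i] == y:
--             count_y += 1
--
--         if (count_x != 0) and (count_x == count_y):
--             ans = i
--     return ans
-- ===== SOURCE B (Python) =====
-- def findLongestPrefix(arr, n, x, y):
--     seg = arr[:n]
--     cx = seg.count(x)
--     cy = seg.count(y)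
--     for i in range(n - 1, -1, -1):
--         if cx == cy and cx != 0:
--             return i
--         if seg[i] == x:
--             cx -= 1
--         if seg[i] == y:
--             cy -= 1
--     return -1
-- ===== Notes on version B (the rewrite author's own statement) =====
-- stated objective: alternative
-- what changed: B first takes the prefix and counts x and y once with list.count, then scans backwards from n-1 returning the first (largest) index whose prefix counts are equal and nonzero, decrementing the totals as it steps down, instead of A's forward scan that keeps overwriting the answer.
import Mathlib
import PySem

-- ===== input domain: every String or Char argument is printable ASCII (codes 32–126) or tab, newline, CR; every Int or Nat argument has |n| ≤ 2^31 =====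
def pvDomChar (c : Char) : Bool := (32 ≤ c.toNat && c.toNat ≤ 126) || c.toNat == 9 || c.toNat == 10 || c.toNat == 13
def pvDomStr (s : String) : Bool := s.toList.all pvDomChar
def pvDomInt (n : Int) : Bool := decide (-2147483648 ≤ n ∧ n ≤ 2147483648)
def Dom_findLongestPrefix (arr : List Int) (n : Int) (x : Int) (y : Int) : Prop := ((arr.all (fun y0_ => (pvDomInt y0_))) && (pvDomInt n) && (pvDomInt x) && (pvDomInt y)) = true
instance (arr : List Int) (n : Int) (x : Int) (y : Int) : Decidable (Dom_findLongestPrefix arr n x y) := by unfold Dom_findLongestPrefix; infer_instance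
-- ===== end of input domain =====

-- B replaces A's forward last-write-wins scan by a totals-first backward early-exit scan (alternative decomposition, same cost).


-- ===== PORT A =====
def findLongestPrefix (arr : List Int) (n : Int) (x : Int) (y : Int) : Int :=
  let st := (PySem.List.pyRange 0 n 1).foldl (fun (s : Int × Int × Int) i =>
    let a := PySem.List.pyGetD arr i 0
    let count_x := if a = x then s.1 + 1 else s.1
    let count_y := if a = y then s.2.1 + 1 else s.2.1
    let ans := if count_x ≠ 0 ∧ count_x = count_y then i else s.2.2
    (count_x, count_y, ans)) (0, 0, -1)
  st.2.2

-- ===== PORT B =====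
-- the backward for-loop of Source B: fuel k counts down the index i = k-1, k-2, …, 0
def altGo (seg : List Int) (x y : Int) : Nat → Int → Int → Int
  | 0, _, _ => -1
  | k+1, cx, cy =>
    if cx = cy ∧ cx ≠ 0 then (k : Int)
    else
      altGo seg x y k
        (if PySem.List.pyGetD seg (k : Int) 0 = x then cx - 1 else cx)
        (if PySem.List.pyGetD seg (k : Int) 0 = y then cy - 1 else cy)

def findLongestPrefix_alt (arr : List Int) (n : Int) (x : Int) (y : Int) : Int :=
  let seg := PySem.List.slice arr none (some n)
  altGo seg x y n.toNat (PySem.List.count seg x) (PySem.List.count seg y)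

-- ===== PRECONDITION & SPEC =====
-- Pre_ excludes n > len(arr), where A's arr[i] raises IndexError.
def Pre_findLongestPrefix (arr : List Int) (n : Int) (x : Int) (y : Int) : Prop :=
  n ≤ (arr.length : Int)
instance (arr : List Int) (n : Int) (x : Int) (y : Int) : Decidable (Pre_findLongestPrefix arr n x y) := by unfold Pre_findLongestPrefix; infer_instance
def pvWitness_findLongestPrefix : List Int × Int × Int × Int := ([1, 2, 1, 2], 4, 1, 2)

def Spec_findLongestPrefix (arr : List Int) (n : Int) (x : Int) (y : Int) (out : Int) : Prop := out = findLongestPrefix_alt arr n x y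
instance (arr : List Int) (n : Int) (x : Int) (y : Int) (out : Int) : Decidable (Spec_findLongestPrefix arr n x y out) := by unfold Spec_findLongestPrefix; infer_instance

-- ===== CLAIM (what is proved, stated in full; the proofs are below) =====
def Claim_equal_findLongestPrefix : Prop := ∀ (arr : List Int) (n : Int) (x : Int) (y : Int), Dom_findLongestPrefix arr n x y → Pre_findLongestPrefix arr n x y → Spec_findLongestPrefix arr n x y (findLongestPrefix arr n x y)

-- ===== LEMMAS AND PROOFS =====

-- altGo never looks past index k-1, so a trailing element is irrelevant
theorem altGo_append (l : List Int) (a x y : Int) :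
    ∀ (k : Nat), k ≤ l.length → ∀ (cx cy : Int),
      altGo (l ++ [a]) x y k cx cy = altGo l x y k cx cy := by
  intro k
  induction k with
  | zero => intro _ cx cy; simp [altGo]
  | succ k ih =>
    intro hk cx cy
    have hk' : k ≤ l.length := by omega
    have hget : PySem.List.pyGetD (l ++ [a]) (k : Int) 0 = PySem.List.pyGetD l (k : Int) 0 := by
      rw [PySem.List.pyGetD_natCast, PySem.List.pyGetD_natCast]
      rw [List.getD_append]
      omega
    simp only [altGo, hget, ih hk']

-- the abbreviations for the A-side fold
def stepA (arr : List Int) (x y : Int) (s : Int × Int × Int) (i : Int) : Int × Int × Int :=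
  let a := PySem.List.pyGetD arr i 0
  let count_x := if a = x then s.1 + 1 else s.1
  let count_y := if a = y then s.2.1 + 1 else s.2.1
  let ans := if count_x ≠ 0 ∧ count_x = count_y then i else s.2.2
  (count_x, count_y, ans)

-- main invariant: after m forward steps, the state is the prefix counts and
-- the answer the backward scan computes on that prefix
theorem foldA_invariant (arr : List Int) (x y : Int) :
    ∀ (m : Nat), m ≤ arr.length →
      (PySem.List.pyRange 0 (m : Int) 1).foldl (stepA arr x y) (0, 0, -1) =
        (((arr.take m).count x : Int), ((arr.take m).count y : Int),
          altGo (arr.take m) x y m ((arr.take m).count x) ((arr.take m).count y)) := by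
  intro m
  induction m with
  | zero => intro _; simp [altGo, PySem.List.pyRange_one_eq_nil]
  | succ m ih =>
    intro hm
    have hm' : m ≤ arr.length := by omega
    have hmlt : m < arr.length := by omega
    have hsplit : PySem.List.pyRange 0 ((m : Nat) + 1 : Int) 1 =
        PySem.List.pyRange 0 (m : Int) 1 ++ [(m : Int)] := by
      exact_mod_cast PySem.List.pyRange_one_succ_right (a := 0) (b := (m : Int)) (by positivity)
    have htake : arr.take (m + 1) = arr.take m ++ [arr[m]] := by
      rw [List.take_succ]
      simp [List.getElem?_eq_getElem hmlt]
    have hlen : (arr.take m).length = m := by simp [List.length_take]; omega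
    have hget : PySem.List.pyGetD arr (m : Int) 0 = arr[m] := by
      rw [PySem.List.pyGetD_natCast, List.getD_eq_getElem _ _ hmlt]
    push_cast
    rw [hsplit, List.foldl_append, ih hm']
    simp only [List.foldl_cons, List.foldl_nil, stepA, hget, htake]
    have hcx : ((arr.take m ++ [arr[m]]).count x : Int)
        = if arr[m] = x then ((arr.take m).count x : Int) + 1 else ((arr.take m).count x : Int) := by
      rw [List.count_append]
      by_cases h : arr[m] = x <;> simp [h, List.count_singleton]
    have hcy : ((arr.take m ++ [arr[m]]).count y : Int)
        = if arr[m] = y then ((arr.take m).count y : Int) + 1 else ((arr.take m).count y : Int) := by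
      rw [List.count_append]
      by_cases h : arr[m] = y <;> simp [h, List.count_singleton]
    -- unfold one step of altGo on the (m+1)-prefix
    have haltget : PySem.List.pyGetD (arr.take m ++ [arr[m]]) (m : Int) 0 = arr[m] := by
      rw [PySem.List.pyGetD_natCast]
      have hlen' : (arr.take m ++ [arr[m]]).length = m + 1 := by
        simp; omega
      rw [List.getD_eq_getElem _ _ (by omega)]
      rw [List.getElem_append_right (by omega)]
      simp [hlen]
    have hx' : (if arr[m] = x then ((arr.take m ++ [arr[m]]).count x : Int) - 1
          else ((arr.take m ++ [arr[m]]).count x : Int)) = ((arr.take m).count x : Int) := by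
      rw [hcx]; by_cases h' : arr[m] = x <;> simp [h']
    have hy' : (if arr[m] = y then ((arr.take m ++ [arr[m]]).count y : Int) - 1
          else ((arr.take m ++ [arr[m]]).count y : Int)) = ((arr.take m).count y : Int) := by
      rw [hcy]; by_cases h' : arr[m] = y <;> simp [h']
    have halt : altGo (arr.take m ++ [arr[m]]) x y (m + 1)
          ((arr.take m ++ [arr[m]]).count x) ((arr.take m ++ [arr[m]]).count y)
        = if ((arr.take m ++ [arr[m]]).count x : Int) = ((arr.take m ++ [arr[m]]).count y : Int)
              ∧ ((arr.take m ++ [arr[m]]).count x : Int) ≠ 0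
          then (m : Int)
          else altGo (arr.take m) x y m ((arr.take m).count x) ((arr.take m).count y) := by
      simp only [altGo, haltget, hx', hy']
      split_ifs with h
      · rfl
      · exact altGo_append _ _ _ _ m (by omega) _ _
    rw [halt]
    simp only [Prod.mk.injEq]
    refine ⟨hcx.symm, hcy.symm, ?_⟩
    rw [hcx, hcy]
    split_ifs with h1 h2 <;> first | rfl | tauto

-- ===== VERDICT (by name: the statement is the Claim_ definition above) =====
theorem findLongestPrefix_spec : Claim_equal_findLongestPrefix := by
  intro arr n x y _ hpre
  unfold Spec_findLongestPrefix findLongestPrefix findLongestPrefix_alt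
  by_cases hn : 0 ≤ n
  · have hm : ((n.toNat : Nat) : Int) = n := Int.toNat_of_nonneg hn
    have hseg : PySem.List.slice arr none (some n) = arr.take n.toNat :=
      PySem.List.slice_to arr hn
    have hmle : n.toNat ≤ arr.length := by
      unfold Pre_findLongestPrefix at hpre; omega
    have := foldA_invariant arr x y n.toNat hmle
    rw [hm] at this
    simp only [hseg, PySem.List.count_eq]
    show ((PySem.List.pyRange 0 n 1).foldl (stepA arr x y) (0, 0, -1)).2.2 = _
    rw [this]
  · have hr : PySem.List.pyRange 0 n 1 = [] :=
      PySem.List.pyRange_one_eq_nil (by omega)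
    have hm0 : n.toNat = 0 := by omega
    simp [hr, hm0, altGo]
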